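-- pv_equiv track=rewrite | github.com/severinbratus/puzzles | csig/03/solve.py | solution
-- ===== SOURCE A (Python) =====
-- from collections import defaultdict
--
-- def get_digit_set(x):
--     return tuple(sorted(str(x)))
--
-- def solution(a):
--     s = defaultdict(int)
--     ans = 0
--     for x in a:
--         key = get_digit_set(x)
--         if key in s:
--             ans += s[key]
--         s[key] += 1
--     return ans
-- ===== SOURCE B (Python) =====
-- from collections import Counter
--
-- def get_digit_set(x):
--     return tuple(sorted(str(x)))
--
-- def solution(a):
--     counts = Counter(get_digit_set(x) for x in a)
--     return sum(c * (c - 1) // 2 for c in counts.values())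
-- ===== Notes on version B (the rewrite author's own statement) =====
-- stated objective: idiomatic
-- what changed: Replaces the incremental add-current-count-then-increment accumulation with two passes: a Counter over all signatures first, then a closed-form sum of c*(c-1)//2 per group.
import Mathlib
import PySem

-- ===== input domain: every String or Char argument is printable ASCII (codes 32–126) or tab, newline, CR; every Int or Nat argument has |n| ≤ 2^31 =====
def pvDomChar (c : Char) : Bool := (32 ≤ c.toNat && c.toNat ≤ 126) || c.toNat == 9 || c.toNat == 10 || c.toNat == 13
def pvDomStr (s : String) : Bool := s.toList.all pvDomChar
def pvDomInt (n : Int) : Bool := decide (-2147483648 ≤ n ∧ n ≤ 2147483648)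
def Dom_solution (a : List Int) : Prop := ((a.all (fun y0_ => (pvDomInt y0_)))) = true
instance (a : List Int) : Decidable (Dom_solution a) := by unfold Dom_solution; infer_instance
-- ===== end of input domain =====

-- B replaces A's incremental "add current count, then increment" accumulation with an
-- idiomatic two-pass form: count all signatures first, then sum c*(c-1)//2 per group.

-- ===== PORT A =====
-- get_digit_set(x) = tuple(sorted(str(x)))
def pySig (x : Int) : List Char :=
  PySem.List.sorted (PySem.Int.toChars x) (fun c => c) false

def solution (a : List Int) : Int :=
  (a.foldl
    (fun (st : PySem.Dict (List Char) Int × Int) x =>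
      let key := pySig x
      let ans := if st.1.contains key then st.2 + st.1.getD key 0 else st.2
      (st.1.modify key 0 (· + 1), ans))
    (PySem.Dict.empty, 0)).2

-- ===== PORT B =====
def solution_alt (a : List Int) : Int :=
  let counts := PySem.Dict.counter (a.map pySig)
  (counts.values.map (fun c => PySem.Int.floordiv (c * (c - 1)) 2)).sum

-- ===== PRECONDITION & SPEC =====
def Spec_solution (a : List Int) (out : Int) : Prop := out = solution_alt a
instance (a : List Int) (out : Int) : Decidable (Spec_solution a out) := by unfold Spec_solution; infer_instance

-- ===== CLAIM (what is proved, stated in full; the proofs are below) =====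
def Claim_equal_solution : Prop := ∀ (a : List Int), Dom_solution a → Spec_solution a (solution a)

-- ===== LEMMAS AND PROOFS =====

-- c*(c-1)//2, the per-group pair count
def c2 (c : Int) : Int := PySem.Int.floordiv (c * (c - 1)) 2

-- B's value as a function of the list of signatures
def gsum (m : List (List Char)) : Int :=
  ((PySem.Set.ofList m).map (fun k => c2 ((m.count k : Int)))).sum

lemma c2_natCast (n : Nat) : c2 ((n : Int)) = ((n * (n - 1) / 2 : Nat) : Int) := by
  cases n with
  | zero => decide
  | succ s =>
    have h : ((s + 1 : Nat) : Int) * (((s + 1 : Nat) : Int) - 1) = (((s + 1) * s : Nat) : Int) := by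
      push_cast; ring
    simp only [c2, h]
    exact_mod_cast PySem.Int.floordiv_natCast ((s + 1) * s) 2

lemma c2_succ (n : Nat) : c2 ((n : Int) + 1) = c2 ((n : Int)) + (n : Int) := by
  have h1 : ((n : Int) + 1) = ((n + 1 : Nat) : Int) := by push_cast; ring
  rw [h1, c2_natCast, c2_natCast]
  have h2 : (n + 1) * ((n + 1) - 1) = n * (n - 1) + 2 * n := by
    cases n with
    | zero => rfl
    | succ s => simp only [Nat.succ_sub_one]; ring
  rw [h2, Nat.add_mul_div_left _ _ (by norm_num : 0 < 2)]
  push_cast; ring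

lemma gsum_append (m : List (List Char)) (k : List Char) :
    gsum (m ++ [k]) = gsum m + (m.count k : Int) := by
  by_cases hk : k ∈ m
  · have h1 : PySem.Set.ofList (m ++ [k]) = PySem.Set.ofList m := by
      rw [PySem.Set.ofList_append_singleton, PySem.Set.add_of_mem]
      exact (PySem.Set.mem_ofList m k).mpr hk
    have hk' : k ∈ PySem.Set.ofList m := (PySem.Set.mem_ofList m k).mpr hk
    obtain ⟨l1, l2, hsplit⟩ := List.append_of_mem hk'
    have hn : (l1 ++ k :: l2).Nodup := hsplit ▸ PySem.Set.nodup_ofList m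
    have hd := List.nodup_append.mp hn
    have hk1 : k ∉ l1 := by
      intro h
      exact hd.2.2 k h k List.mem_cons_self rfl
    have hk2 : k ∉ l2 := (List.nodup_cons.mp hd.2.1).1
    rw [gsum, gsum, h1, hsplit, List.map_append, List.map_append, List.sum_append,
      List.sum_append, List.map_cons, List.map_cons, List.sum_cons, List.sum_cons]
    have e1 : l1.map (fun j => c2 (((m ++ [k]).count j : Int)))
        = l1.map (fun j => c2 ((m.count j : Int))) := by
      apply List.map_congr_left; intro j hj
      have hjk : ¬ k = j := fun h => hk1 (h ▸ hj)
      have hc : (m ++ [k]).count j = m.count j := by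
        simp [List.count_append, hjk]
      rw [hc]
    have e2 : l2.map (fun j => c2 (((m ++ [k]).count j : Int)))
        = l2.map (fun j => c2 ((m.count j : Int))) := by
      apply List.map_congr_left; intro j hj
      have hjk : ¬ k = j := fun h => hk2 (h ▸ hj)
      have hc : (m ++ [k]).count j = m.count j := by
        simp [List.count_append, hjk]
      rw [hc]
    rw [e1, e2]
    have hc : (m ++ [k]).count k = m.count k + 1 := by simp [List.count_append]
    rw [hc]
    push_cast
    rw [c2_succ]
    ring
  · have h1 : PySem.Set.ofList (m ++ [k]) = PySem.Set.ofList m ++ [k] := by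
      rw [PySem.Set.ofList_append_singleton, PySem.Set.add_of_not_mem]
      simpa [PySem.Set.mem_ofList] using hk
    rw [gsum, gsum, h1, List.map_append, List.sum_append]
    have h2 : (PySem.Set.ofList m).map (fun j => c2 (((m ++ [k]).count j : Int)))
        = (PySem.Set.ofList m).map (fun j => c2 ((m.count j : Int))) := by
      apply List.map_congr_left
      intro j hj
      have hjk : ¬ k = j := fun h => hk (h ▸ (PySem.Set.mem_ofList m j).mp hj)
      have hc : (m ++ [k]).count j = m.count j := by
        simp [List.count_append, hjk]
      rw [hc]
    rw [h2]
    have hc0 : m.count k = 0 := List.count_eq_zero_of_not_mem hk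
    simp [List.count_append, hc0]
    decide

-- A's loop invariant: the fold state is (counter of signatures so far, gsum of them)
lemma foldA_eq (a : List Int) :
    a.foldl
      (fun (st : PySem.Dict (List Char) Int × Int) x =>
        let key := pySig x
        let ans := if st.1.contains key then st.2 + st.1.getD key 0 else st.2
        (st.1.modify key 0 (· + 1), ans))
      (PySem.Dict.empty, 0)
    = (PySem.Dict.counter (a.map pySig), gsum (a.map pySig)) := by
  induction a using List.reverseRecOn with
  | nil => rfl
  | append_singleton xs x ih =>
    rw [List.foldl_append, ih, List.map_append]
    simp only [List.foldl_cons, List.foldl_nil, List.map_cons, List.map_nil]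
    refine Prod.ext ?_ ?_
    · exact (PySem.Dict.counter_append_singleton (xs.map pySig) (pySig x)).symm
    · show (if (PySem.Dict.counter (xs.map pySig)).contains (pySig x) then
          gsum (xs.map pySig) + (PySem.Dict.counter (xs.map pySig)).getD (pySig x) 0
        else gsum (xs.map pySig)) = gsum (xs.map pySig ++ [pySig x])
      rw [gsum_append, PySem.Dict.contains_counter, PySem.Dict.getD_counter]
      by_cases hc : pySig x ∈ xs.map pySig
      · simp [hc]
      · simp [hc, List.count_eq_zero_of_not_mem hc]

lemma alt_eq_gsum (a : List Int) : solution_alt a = gsum (a.map pySig) := by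
  unfold solution_alt gsum
  simp only [PySem.Dict.values, PySem.Dict.items_counter, List.map_map]
  rfl

-- ===== VERDICT (by name: the statement is the Claim_ definition above) =====
theorem solution_spec : Claim_equal_solution := by
  intro a _
  unfold Spec_solution solution
  rw [foldA_eq, alt_eq_gsum]
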